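-- pv_equiv track=rewrite | github.com/agroce/swarmed_tools | jsfunfuzz/jsDD.py | parenSplitInner
-- ===== SOURCE A (Python) =====
-- def parenSplitInner(string):
--     tryBegin = string[0:10]
--     tryEnd = string[-3:]
--     string = string[10:-3]
--     splits = [tryBegin]
--     leftParens = "([{"
--     rightParens = ")]}"
--     if string == "":
--         return splits
--     pos = 0
--     lastLeft = 0
--     leftMark = ""
--     rightMark = ""
--     while pos < len(string):
--         if (string[pos] in leftParens):
--             leftMark = string[pos]
--             rightMark = rightParens[leftParens.find(leftMark)]
--             lastLeft = pos
--             pos = pos + 1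
--         elif (string[pos] == rightMark):
--             splits.append(string[:lastLeft])
--             splits.append(string[lastLeft:pos+1])
--             string = string[pos+1:]
--             rightMark = ""
--             pos = 0
--         else:
--             pos = pos + 1
--     splits.append(string)
--     splits.append(tryEnd)
--     return splits
-- ===== SOURCE B (Python) =====
-- def parenSplitInner(string):
--     tryBegin = string[0:10]
--     tryEnd = string[-3:]
--     s = string[10:-3]
--     splits = [tryBegin]
--     if s == "":
--         return splits
--     base = 0
--     last = 0
--     rightMark = ""
--     for pos, ch in enumerate(s):
--         if ch in "([{":
--             last = pos
--             rightMark = ")]}"["([{".index(ch)]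
--         elif ch == rightMark:
--             splits.append(s[base:last])
--             splits.append(s[last:pos + 1])
--             base = pos + 1
--             rightMark = ""
--     splits.append(s[base:])
--     splits.append(tryEnd)
--     return splits
-- ===== Notes on version B (the rewrite author's own statement) =====
-- stated objective: faster
-- what changed: A rebuilds the remaining string after every matched bracket pair and resets its scan position to 0; B makes a single left-to-right pass over the fixed string, keeping a base offset and slicing pieces out of the original string.
import Mathlib
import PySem

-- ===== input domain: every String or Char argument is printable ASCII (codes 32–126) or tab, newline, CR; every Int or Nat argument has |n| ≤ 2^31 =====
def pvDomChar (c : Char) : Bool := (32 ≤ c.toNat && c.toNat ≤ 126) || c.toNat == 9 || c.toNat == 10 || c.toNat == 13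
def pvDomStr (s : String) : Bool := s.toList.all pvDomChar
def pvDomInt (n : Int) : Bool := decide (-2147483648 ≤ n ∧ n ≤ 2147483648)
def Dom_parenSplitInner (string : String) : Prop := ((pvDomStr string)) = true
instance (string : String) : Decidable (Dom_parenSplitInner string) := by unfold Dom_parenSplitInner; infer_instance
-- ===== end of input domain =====

-- B replaces A's quadratic "truncate the string after every matched pair and rescan from
-- index 0" loop by a single left-to-right pass over the fixed string with a base offset;
-- objective: faster (asymptotic in the number of matched pairs).

-- ===== PORT A =====
def pvLeftParens : List Char := ['(', '[', '{']
def pvRightParens : List Char := [')', ']', '}']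

-- the while loop of A: state (string, pos, lastLeft, rightMark, splits); returns (splits, final string)
def pvLoopA (s : List Char) (pos lastLeft : Nat) (rightMark : List Char)
    (splits : List String) : List String × List Char :=
  if h : pos < s.length then
    let c := s[pos]
    if c ∈ pvLeftParens then
      -- rightMark = rightParens[leftParens.find(leftMark)]
      pvLoopA s (pos + 1) pos
        [(PySem.List.pyGet? pvRightParens (PySem.Chars.find pvLeftParens [c])).getD ' ']
        splits
    else if [c] = rightMark then
      pvLoopA (s.drop (pos + 1)) 0 lastLeft []
        (splits ++ [String.ofList (s.take lastLeft), String.ofList ((s.take (pos + 1)).drop lastLeft)])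
    else
      pvLoopA s (pos + 1) lastLeft rightMark splits
  else (splits, s)
termination_by s.length - pos
decreasing_by all_goals (try simp only [List.length_drop]); omega

def parenSplitInner (string : String) : List String :=
  let cs := string.toList
  let tryBegin := PySem.List.slice cs (some 0) (some 10)
  let tryEnd := PySem.List.slice cs (some (-3)) none
  let s := PySem.List.slice cs (some 10) (some (-3))
  let splits := [String.ofList tryBegin]
  if s = [] then splits
  else
    let r := pvLoopA s 0 0 [] splits
    r.1 ++ [String.ofList r.2, String.ofList tryEnd]

-- ===== PORT B =====
-- the for-loop of B: structural recursion over the remaining characters, carrying the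
-- absolute position pos, the base offset and lastLeft into the FIXED string m; returns (splits, base)
def pvLoopB (m : List Char) : List Char → Nat → Nat → Nat → List Char → List String →
    List String × Nat
  | [], _, base, _, _, acc => (acc, base)
  | c :: rest, pos, base, last, rightMark, acc =>
    if c ∈ pvLeftParens then
      pvLoopB m rest (pos + 1) base pos
        ((PySem.List.index? pvLeftParens c).elim ' ' (fun i => pvRightParens.getD i ' ') |> ([·]))
        acc
    else if [c] = rightMark then
      pvLoopB m rest (pos + 1) (pos + 1) last []
        (acc ++ [String.ofList ((m.take last).drop base), String.ofList ((m.take (pos + 1)).drop last)])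
    else
      pvLoopB m rest (pos + 1) base last rightMark acc

def parenSplitInner_alt (string : String) : List String :=
  let cs := string.toList
  let tryBegin := PySem.List.slice cs (some 0) (some 10)
  let tryEnd := PySem.List.slice cs (some (-3)) none
  let s := PySem.List.slice cs (some 10) (some (-3))
  if s = [] then [String.ofList tryBegin]
  else
    let r := pvLoopB s s 0 0 0 [] [String.ofList tryBegin]
    r.1 ++ [String.ofList (s.drop r.2), String.ofList tryEnd]

-- ===== PRECONDITION & SPEC =====
def Spec_parenSplitInner (string : String) (out : List String) : Prop := out = parenSplitInner_alt string
instance (string : String) (out : List String) : Decidable (Spec_parenSplitInner string out) := by unfold Spec_parenSplitInner; infer_instance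

-- ===== CLAIM (what is proved, stated in full; the proofs are below) =====
def Claim_equal_parenSplitInner : Prop := ∀ (string : String), Dom_parenSplitInner string → Spec_parenSplitInner string (parenSplitInner string)

-- ===== LEMMAS AND PROOFS =====

-- the two ports compute the same closing bracket for a char in "([{"
lemma pvRightFor_eq (c : Char) (hc : c ∈ pvLeftParens) :
    [(PySem.List.pyGet? pvRightParens (PySem.Chars.find pvLeftParens [c])).getD ' ']
      = ((PySem.List.index? pvLeftParens c).elim ' ' (fun i => pvRightParens.getD i ' ') |> ([·])) := by
  simp only [pvLeftParens, List.mem_cons, List.not_mem_nil, or_false] at hc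
  rcases hc with rfl | rfl | rfl <;> decide

-- main loop correspondence: A running on the suffix m.drop base with relative position pos
-- equals B running on the fixed m with absolute position base+pos; lastLeft values agree
-- (as absolute positions) whenever rightMark is nonempty.
lemma pvLoop_eq (m : List Char) : ∀ n base pos llA llB (rm : List Char) splits,
    m.length - (base + pos) ≤ n → base ≤ m.length →
    (rm ≠ [] → llB = base + llA) →
    pvLoopA (m.drop base) pos llA rm splits =
      ((pvLoopB m (m.drop (base + pos)) (base + pos) base llB rm splits).1,
        m.drop (pvLoopB m (m.drop (base + pos)) (base + pos) base llB rm splits).2) := by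
  intro n
  induction n with
  | zero =>
    intro base pos llA llB rm splits hn hb _
    have hge : m.length ≤ base + pos := by omega
    rw [pvLoopA]
    have hlen : (m.drop base).length = m.length - base := List.length_drop ..
    have : ¬ pos < (m.drop base).length := by omega
    simp only [this, dite_false]
    rw [List.drop_eq_nil_of_le hge]
    rfl
  | succ n ih =>
    intro base pos llA llB rm splits hn hb hll
    by_cases hlt : base + pos < m.length
    · have hdrop : m.drop (base + pos) = m[base + pos] :: m.drop (base + pos + 1) :=
        List.drop_eq_getElem_cons hlt
      have hposlt : pos < (m.drop base).length := by
        rw [List.length_drop]; omega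
      have hget : (m.drop base)[pos] = m[base + pos] := by
        rw [List.getElem_drop]
      rw [pvLoopA, dif_pos hposlt, hdrop]
      simp only [pvLoopB, hget]
      by_cases hL : m[base + pos] ∈ pvLeftParens
      · simp only [if_pos hL]
        rw [pvRightFor_eq _ hL]
        have := ih base (pos + 1) pos (base + pos)
          (((PySem.List.index? pvLeftParens m[base + pos]).elim ' '
              (fun i => pvRightParens.getD i ' ')) |> ([·])) splits
          (by omega) hb (fun _ => rfl)
        rw [show base + (pos + 1) = base + pos + 1 by omega] at this
        exact this
      · simp only [if_neg hL]
        by_cases hR : [m[base + pos]] = rm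
        · simp only [if_pos hR]
          have hrm : rm ≠ [] := by rw [← hR]; simp
          have hllb := hll hrm
          subst hllb
          have hp1 : (m.drop base).take llA = (m.take (base + llA)).drop base := by
            rw [List.take_drop]
          have hp2 : ((m.drop base).take (pos + 1)).drop llA
              = (m.take (base + pos + 1)).drop (base + llA) := by
            rw [List.take_drop, List.drop_drop, Nat.add_assoc]
          rw [hp1, hp2, List.drop_drop]
          have hrec := ih (base + pos + 1) 0 llA (base + llA) []
            (splits ++ [String.ofList ((m.take (base + llA)).drop base),
              String.ofList ((m.take (base + pos + 1)).drop (base + llA))])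
            (by omega) (by omega) (fun h => absurd rfl h)
          simp only [Nat.add_zero] at hrec
          rw [show base + (pos + 1) = base + pos + 1 by omega]
          exact hrec
        · simp only [if_neg hR]
          have := ih base (pos + 1) llA llB rm splits (by omega) hb hll
          rw [show base + (pos + 1) = base + pos + 1 by omega] at this
          exact this
    · -- base + pos ≥ length: both loops stop
      rw [pvLoopA]
      have hlen : (m.drop base).length = m.length - base := List.length_drop ..
      have hposge : ¬ pos < (m.drop base).length := by omega
      simp only [hposge, dite_false]
      rw [List.drop_eq_nil_of_le (show m.length ≤ base + pos by omega)]
      rfl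

-- ===== VERDICT (by name: the statement is the Claim_ definition above) =====
theorem parenSplitInner_spec : Claim_equal_parenSplitInner := by
  intro string _
  unfold Spec_parenSplitInner parenSplitInner parenSplitInner_alt
  simp only []
  set s := PySem.List.slice string.toList (some 10) (some (-3)) with hs
  by_cases h : s = []
  · simp [h]
  · simp only [if_neg h]
    have := pvLoop_eq s s.length 0 0 0 0 [] [String.ofList (PySem.List.slice string.toList (some 0) (some 10))]
      (by omega) (by omega) (fun _ => rfl)
    simp only [List.drop_zero, Nat.add_zero] at this
    rw [this]
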